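-- pv_equiv track=rewrite | github.com/MOHAMMAD-KIMIA/Compiler | Compiler 1st phase (Lexical Analysis)/COM.py | dfaMinus
-- ===== SOURCE A (Python) =====
-- def dfaMinus(input_text):
--     state = 'A'
--     tokens = []
--     errors = []
--     position = 0
--
--     for ch in input_text:
--         position += 1
--         match state:
--             case 'A':
--                 if ch == '<':
--                     state = 'B'
--                 else:
--                     errors.append(f"")
--                     state = 'Z'
--             case 'B':
--                 if ch == '-':
--                     state = 'C'
--                 else:
--                     errors.append(f"")
--                     state = 'Z'
--             case 'C':
--                 if ch == '>':
--                     state = 'D'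
--                 else:
--                     errors.append(f"")
--                     state = 'Z'
--
--     if state == 'D':
--         tokens.append("<->")
--     else:
--         errors.append("Error: Input did not end in the accepting state")
--
--     return tokens, errors
-- ===== SOURCE B (Python) =====
-- def dfaMinus(input_text):
--     pattern = "<->"
--     i = 0
--     while i < 3 and i < len(input_text) and input_text[i] == pattern[i]:
--         i += 1
--     if i == 3:
--         return ["<->"], []
--     errors = [""] if i < len(input_text) else []
--     errors.append("Error: Input did not end in the accepting state")
--     return [], errors
-- ===== Notes on version B (the rewrite author's own statement) =====
-- stated objective: simpler
-- what changed: Replaces the explicit four-state DFA driven over every input character with a longest-common-prefix comparison against the three-character literal pattern, examining at most the first three characters.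
import Mathlib
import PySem

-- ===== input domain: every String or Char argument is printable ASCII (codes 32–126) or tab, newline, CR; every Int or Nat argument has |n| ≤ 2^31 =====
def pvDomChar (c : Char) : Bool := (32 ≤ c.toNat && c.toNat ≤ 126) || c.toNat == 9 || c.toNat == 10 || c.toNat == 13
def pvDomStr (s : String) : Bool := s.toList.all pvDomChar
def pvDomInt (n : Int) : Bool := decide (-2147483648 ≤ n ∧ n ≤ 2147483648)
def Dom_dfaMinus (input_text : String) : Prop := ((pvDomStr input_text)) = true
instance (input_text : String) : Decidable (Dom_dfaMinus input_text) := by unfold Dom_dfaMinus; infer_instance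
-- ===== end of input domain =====

-- B replaces the four-state DFA loop over every character by a longest-common-prefix
-- comparison against the literal pattern "<->" (simpler; examines at most 3 characters).

-- ===== PORT A =====
-- one DFA transition: state × errors-so-far, fed one character (Python's match/case body)
def dfaMinusStep (s : Char × List String) (ch : Char) : Char × List String :=
  if s.1 = 'A' then
    if ch = '<' then ('B', s.2) else ('Z', s.2 ++ [""])
  else if s.1 = 'B' then
    if ch = '-' then ('C', s.2) else ('Z', s.2 ++ [""])
  else if s.1 = 'C' then
    if ch = '>' then ('D', s.2) else ('Z', s.2 ++ [""])
  else s

def dfaMinus (input_text : String) : List String × List String :=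
  let r := input_text.toList.foldl dfaMinusStep ('A', [])
  if r.1 = 'D' then (["<->"], r.2)
  else ([], r.2 ++ ["Error: Input did not end in the accepting state"])

-- ===== PORT B =====
-- length of the longest common prefix of the input and the pattern (B's while loop)
def dfaMinusLcp : List Char → List Char → Nat
  | a :: as, b :: bs => if a = b then dfaMinusLcp as bs + 1 else 0
  | _, _ => 0

def dfaMinus_alt (input_text : String) : List String × List String :=
  let i := dfaMinusLcp input_text.toList ['<', '-', '>']
  if i = 3 then (["<->"], [])
  else ([], (if i < input_text.toList.length then [""] else [])
              ++ ["Error: Input did not end in the accepting state"])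

-- ===== PRECONDITION & SPEC =====
def Spec_dfaMinus (input_text : String) (out : List String × List String) : Prop := out = dfaMinus_alt input_text
instance (input_text : String) (out : List String × List String) : Decidable (Spec_dfaMinus input_text out) := by unfold Spec_dfaMinus; infer_instance

-- ===== CLAIM (what is proved, stated in full; the proofs are below) =====
def Claim_equal_dfaMinus : Prop := ∀ (input_text : String), Dom_dfaMinus input_text → Spec_dfaMinus input_text (dfaMinus input_text)

-- ===== LEMMAS AND PROOFS =====

-- the sink state 'Z' and the accepting state 'D' absorb the rest of the input
theorem dfaMinus_foldZ (l : List Char) (errs : List String) :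
    l.foldl dfaMinusStep ('Z', errs) = ('Z', errs) := by
  induction l with
  | nil => rfl
  | cons a as ih => simpa [dfaMinusStep] using ih

theorem dfaMinus_foldD (l : List Char) (errs : List String) :
    l.foldl dfaMinusStep ('D', errs) = ('D', errs) := by
  induction l with
  | nil => rfl
  | cons a as ih => simpa [dfaMinusStep] using ih

-- ===== VERDICT (by name: the statement is the Claim_ definition above) =====
theorem dfaMinus_spec : Claim_equal_dfaMinus := by
  intro s _
  unfold Spec_dfaMinus dfaMinus dfaMinus_alt
  rcases hl : s.toList with _ | ⟨a, _ | ⟨b, _ | ⟨c, rest⟩⟩⟩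
  · simp [dfaMinusLcp]
  · by_cases ha : a = '<' <;>
      simp [dfaMinusStep, dfaMinusLcp, ha]
  · by_cases ha : a = '<' <;> by_cases hb : b = '-' <;>
      simp [dfaMinusStep, dfaMinusLcp, ha, hb]
  · by_cases ha : a = '<' <;> by_cases hb : b = '-' <;> by_cases hc : c = '>' <;>
      simp [dfaMinusStep, dfaMinusLcp, dfaMinus_foldZ, dfaMinus_foldD, ha, hb, hc]
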